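-- pv_equiv track=rewrite | github.com/pypi-data/pypi-mirror-401 | packages/bioflow-insight/bioflow_insight-2.0.11.tar.gz/bioflow_insight-2.0.11/src/call.py | get_code_split_space
-- ===== SOURCE A (Python) =====
-- def get_code_split_space(code):
--     to_add_spaces = ['(', ')', '}', '{']
--     for character in to_add_spaces:
--         temp = code
--         if(character in code):
--             code = code.replace(f'{character}', f' {character} ')
--             if(temp==code):
--                 raise Exception("This shouldn't happen")
--     return code.split()
-- ===== SOURCE B (Python) =====
-- def get_code_split_space(code):
--     # Single left-to-right scan: brackets become one-char tokens, maximal runs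
--     # of other non-whitespace characters become tokens.
--     tokens = []
--     cur = []
--     for ch in code:
--         if ch in '(){}':
--             if cur:
--                 tokens.append(''.join(cur))
--                 cur = []
--             tokens.append(ch)
--         elif ch.isspace():
--             if cur:
--                 tokens.append(''.join(cur))
--                 cur = []
--         else:
--             cur.append(ch)
--     if cur:
--         tokens.append(''.join(cur))
--     return tokens
-- ===== Notes on version B (the rewrite author's own statement) =====
-- stated objective: idiomatic
-- what changed: Replaced the four sequential replace passes plus split with a single left-to-right scan that emits bracket characters as one-char tokens and maximal runs of other non-whitespace characters as tokens.
import Mathlib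
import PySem

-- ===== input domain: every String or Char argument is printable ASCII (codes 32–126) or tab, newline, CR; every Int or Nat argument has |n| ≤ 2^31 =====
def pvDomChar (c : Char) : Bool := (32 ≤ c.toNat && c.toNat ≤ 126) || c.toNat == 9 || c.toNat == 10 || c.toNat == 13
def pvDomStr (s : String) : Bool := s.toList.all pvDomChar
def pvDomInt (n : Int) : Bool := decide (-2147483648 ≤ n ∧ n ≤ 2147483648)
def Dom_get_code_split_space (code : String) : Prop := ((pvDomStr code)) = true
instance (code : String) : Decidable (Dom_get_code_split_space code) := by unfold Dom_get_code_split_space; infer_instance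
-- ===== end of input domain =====

-- B replaces A's four replace-passes-then-split pipeline by a single left-to-right
-- scan that emits bracket tokens and maximal non-space/non-bracket runs directly.


-- ===== PORT A =====
-- one iteration of A's loop body; `none` models the (unreachable) `raise`
def pvAStep (code : String) (ch : String) : Option String :=
  if PySem.Str.isIn ch code then
    let new := PySem.Str.replace code ch (" " ++ ch ++ " ")
    if code == new then none else some new
  else some code

def get_code_split_space (code : String) : List String :=
  match ["(", ")", "}", "{"].foldl (fun acc ch => acc.bind (fun c => pvAStep c ch)) (some code) with
  | some c => PySem.Str.split₀ c
  | none => []  -- Python raises here; proven unreachable (pvAStep never returns none)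

-- ===== PORT B =====
-- B's scan: `cur` is the pending run of ordinary characters, tokens come out in order
def pvAltGo : List Char → List Char → List (List Char)
  | [], cur => if cur = [] then [] else [cur]
  | c :: rest, cur =>
    if c = '(' ∨ c = ')' ∨ c = '{' ∨ c = '}' then
      (if cur = [] then [] else [cur]) ++ [c] :: pvAltGo rest []
    else if PySem.Chars.isspace c then
      (if cur = [] then [] else [cur]) ++ pvAltGo rest []
    else pvAltGo rest (cur ++ [c])

def get_code_split_space_alt (code : String) : List String :=
  (pvAltGo code.toList []).map String.ofList

-- ===== PRECONDITION & SPEC =====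
def Spec_get_code_split_space (code : String) (out : List String) : Prop := out = get_code_split_space_alt code
instance (code : String) (out : List String) : Decidable (Spec_get_code_split_space code out) := by unfold Spec_get_code_split_space; infer_instance

-- ===== CLAIM (what is proved, stated in full; the proofs are below) =====
def Claim_equal_get_code_split_space : Prop := ∀ (code : String), Dom_get_code_split_space code → Spec_get_code_split_space code (get_code_split_space code)

-- ===== LEMMAS AND PROOFS =====

-- what one replace pass does to one character
def pvPadOne (b c : Char) : List Char := if c = b then [' ', b, ' '] else [c]
-- what all four passes together do to one character
def pvPad (c : Char) : List Char :=
  if c = '(' ∨ c = ')' ∨ c = '{' ∨ c = '}' then [' ', c, ' '] else [c]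

theorem pvReplaceGo (b : Char) (nw : List Char) :
    ∀ (fuel : Nat) (l acc : List Char), l.length ≤ fuel →
      PySem.Chars.replace.go [b] nw fuel l acc
        = acc.reverse ++ l.flatMap (fun c => if c = b then nw else [c]) := by
  intro fuel
  induction fuel with
  | zero =>
    intro l acc h
    have : l = [] := List.eq_nil_of_length_eq_zero (Nat.le_zero.mp h)
    subst this; simp [PySem.Chars.replace.go]
  | succ n ih =>
    intro l acc h
    cases l with
    | nil => simp [PySem.Chars.replace.go]
    | cons c t =>
      simp only [PySem.Chars.replace.go]
      by_cases hc : c = b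
      · subst hc
        rw [if_pos (by simp [List.isPrefixOf])]
        simp only [List.length_singleton, List.drop_one, List.tail_cons]
        rw [ih t (nw.reverse ++ acc) (by simpa using Nat.lt_succ_iff.mp (by simpa using h))]
        simp
      · rw [if_neg (by simp [List.isPrefixOf]; exact fun hh => hc hh.symm)]
        rw [ih t (c :: acc) (by simpa using Nat.lt_succ_iff.mp (by simpa using h))]
        simp [hc]

theorem pvReplaceSingle (s : List Char) (b : Char) (nw : List Char) :
    PySem.Chars.replace s [b] nw = s.flatMap (fun c => if c = b then nw else [c]) := by
  simp only [PySem.Chars.replace, List.isEmpty_cons, Bool.false_eq_true, if_false]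
  simpa using pvReplaceGo b nw s.length s [] (le_refl _)

theorem pvFlatMapId (b : Char) (s : List Char) (h : b ∉ s) :
    s.flatMap (pvPadOne b) = s := by
  induction s with
  | nil => rfl
  | cons c t ih =>
    simp only [List.mem_cons, not_or] at h
    simp [pvPadOne, Ne.symm h.1, ih h.2]

theorem pvFlatMapLen (b : Char) (s : List Char) (h : b ∈ s) :
    s.length < (s.flatMap (pvPadOne b)).length := by
  induction s with
  | nil => simp at h
  | cons c t ih =>
    simp only [List.flatMap_cons, List.length_append, List.length_cons]
    by_cases hc : c = b
    · have : (pvPadOne b c).length = 3 := by simp [pvPadOne, hc]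
      rw [this]
      have : t.length ≤ (t.flatMap (pvPadOne b)).length := by
        clear h ih; induction t with
        | nil => simp
        | cons d u ihu =>
          simp only [List.flatMap_cons, List.length_append, List.length_cons]
          have : 1 ≤ (pvPadOne b d).length := by
            by_cases hd : d = b <;> simp [pvPadOne, hd]
          omega
      omega
    · have hb : b ∈ t := by rcases List.mem_cons.mp h with h1 | h1; exact absurd h1.symm hc; exact h1
      have : (pvPadOne b c).length = 1 := by simp [pvPadOne, hc]
      have := ih hb
      omega

theorem pvStepEq (b : Char) (ch : String) (hch : ch.toList = [b]) (code : String) :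
    pvAStep code ch = some (String.ofList (code.toList.flatMap (pvPadOne b))) := by
  unfold pvAStep
  by_cases hin : PySem.Str.isIn ch code = true
  · have hb : b ∈ code.toList := by
      have := (PySem.Str.isIn_iff_infix ch code).mp hin
      rw [hch] at this
      exact (List.singleton_infix_iff b code.toList).mp this
    rw [if_pos hin]
    have hrep : (PySem.Str.replace code ch (" " ++ ch ++ " ")).toList
        = code.toList.flatMap (pvPadOne b) := by
      have : (" " ++ ch ++ " ").toList = [' ', b, ' '] := by
        simp [hch]
      simp only [PySem.Str.toList_replace, hch, this, pvReplaceSingle]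
      rfl
    have hne : code ≠ PySem.Str.replace code ch (" " ++ ch ++ " ") := by
      intro he
      have := pvFlatMapLen b code.toList hb
      rw [← hrep, ← he] at this
      omega
    rw [if_neg (by simpa using hne)]
    congr 1
    apply String.toList_inj.mp
    simp [hrep]
  · have hb : b ∉ code.toList := by
      intro hmem
      apply hin
      rw [PySem.Str.isIn_iff_infix, hch]
      exact (List.singleton_infix_iff b code.toList).mpr hmem
    rw [if_neg hin]
    congr 1
    apply String.toList_inj.mp
    simp [pvFlatMapId b code.toList hb]

theorem pvComposeChar (c : Char) :
    ((((pvPadOne '(' c).flatMap (pvPadOne ')')).flatMap (pvPadOne '}')).flatMap (pvPadOne '{')) = pvPad c := by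
  by_cases h1 : c = '(' ; · subst h1; decide
  by_cases h2 : c = ')' ; · subst h2; decide
  by_cases h3 : c = '}' ; · subst h3; decide
  by_cases h4 : c = '{' ; · subst h4; decide
  simp [pvPadOne, pvPad, h1, h2, h3, h4]

theorem pvCompose (l : List Char) :
    (((l.flatMap (pvPadOne '(')).flatMap (pvPadOne ')')).flatMap (pvPadOne '}')).flatMap (pvPadOne '{')
      = l.flatMap pvPad := by
  induction l with
  | nil => rfl
  | cons c t ih =>
    simp only [List.flatMap_cons, List.flatMap_append, ih, pvComposeChar]

theorem pvBracketNotSpace (c : Char) (h : c = '(' ∨ c = ')' ∨ c = '{' ∨ c = '}') :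
    PySem.Chars.isspace c = false := by
  rcases h with h | h | h | h <;> subst h <;> decide

theorem pvSplitGo (s : List Char) :
    ∀ cur acc, PySem.Chars.split₀.go (s.flatMap pvPad) cur acc
      = acc.reverse ++ pvAltGo s cur.reverse := by
  induction s with
  | nil =>
    intro cur acc
    by_cases hc : cur = []
    · subst hc; simp [PySem.Chars.split₀.go, pvAltGo]
    · simp [PySem.Chars.split₀.go, pvAltGo, hc, List.isEmpty_iff]
  | cons c rest ih =>
    intro cur acc
    by_cases hb : c = '(' ∨ c = ')' ∨ c = '{' ∨ c = '}'
    · have hpad : pvPad c = [' ', c, ' '] := by simp [pvPad, hb]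
      simp only [List.flatMap_cons, hpad, List.cons_append, List.nil_append]
      show PySem.Chars.split₀.go (' ' :: (c :: (' ' :: rest.flatMap pvPad))) cur acc = _
      by_cases hc : cur = []
      · subst hc
        simp only [PySem.Chars.split₀.go]
        rw [if_pos (by decide), if_pos (by simp), if_neg (by simp [pvBracketNotSpace c hb]),
            if_pos (by decide), if_neg (by simp)]
        rw [ih [] ([c].reverse :: acc)]
        simp [pvAltGo, hb]
      · simp only [PySem.Chars.split₀.go]
        rw [if_pos (by decide), if_neg (by simpa [List.isEmpty_iff] using hc),
            if_neg (by simp [pvBracketNotSpace c hb]),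
            if_pos (by decide), if_neg (by simp)]
        rw [ih [] ([c].reverse :: (cur.reverse :: acc))]
        simp [pvAltGo, hb, hc, List.reverse_eq_nil_iff]
    · by_cases hs : PySem.Chars.isspace c = true
      · have hpad : pvPad c = [c] := by simp [pvPad, hb]
        simp only [List.flatMap_cons, hpad, List.cons_append, List.nil_append]
        by_cases hc : cur = []
        · subst hc
          simp only [PySem.Chars.split₀.go]
          rw [if_pos hs, if_pos (by simp)]
          rw [ih [] acc]
          simp [pvAltGo, hb, hs]
        · simp only [PySem.Chars.split₀.go]
          rw [if_pos hs, if_neg (by simpa [List.isEmpty_iff] using hc)]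
          rw [ih [] (cur.reverse :: acc)]
          simp [pvAltGo, hb, hs, hc, List.reverse_eq_nil_iff]
      · have hpad : pvPad c = [c] := by simp [pvPad, hb]
        simp only [List.flatMap_cons, hpad, List.cons_append, List.nil_append]
        simp only [PySem.Chars.split₀.go]
        rw [if_neg hs]
        rw [ih (c :: cur) acc]
        simp [pvAltGo, hb, hs]

-- ===== VERDICT (by name: the statement is the Claim_ definition above) =====
theorem get_code_split_space_spec : Claim_equal_get_code_split_space := by
  intro code _
  unfold Spec_get_code_split_space
  have hfold : ["(", ")", "}", "{"].foldl (fun acc ch => acc.bind (fun c => pvAStep c ch)) (some code)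
      = some (String.ofList (code.toList.flatMap pvPad)) := by
    simp only [List.foldl_cons, List.foldl_nil]
    rw [Option.bind_some, pvStepEq '(' "(" (by decide) code]
    rw [Option.bind_some, pvStepEq ')' ")" (by decide) _]
    rw [Option.bind_some, pvStepEq '}' "}" (by decide) _]
    rw [Option.bind_some, pvStepEq '{' "{" (by decide) _]
    simp only [String.toList_ofList]
    rw [pvCompose]
  unfold get_code_split_space
  rw [hfold]
  apply List.map_injective_iff.mpr (fun a b h => String.toList_inj.mp h)
  rw [PySem.Str.split₀_map_toList]
  simp only [String.toList_ofList]
  simp only [PySem.Chars.split₀]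
  rw [pvSplitGo code.toList [] []]
  unfold get_code_split_space_alt
  simp [Function.comp_def]
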